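-- pv_equiv track=rewrite | github.com/mixlaab/myWork | Python/ProgAvTareas/tarea1/edygzz.py | nrobin
-- ===== SOURCE A (Python) =====
-- def decabin(num):
--     binario= bin(num)
--     binar = (binario.replace('ob',''))
--     return binar
--
-- def nrobin(z):
--     numb = decabin(z)
--     nb = 0
--     gpm = 0
--     for i in range (len(numb)):
--         if numb[i] == '1':
--             if nb > gpm:
--                 gpm = nb
--             nb = 0
--         else:
--             nb = nb + 1
--
--     return gpm
-- ===== SOURCE B (Python) =====
-- def nrobin(z):
--     s = bin(z)
--     parts = s.split('1')
--     return max((len(p) for p in parts[:-1]), default=0)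
-- ===== Notes on version B (the rewrite author's own statement) =====
-- stated objective: simpler
-- what changed: Replaces the stateful counter/maximum loop over the characters of bin(z) with a direct split of bin(z) on '1' and a maximum over the lengths of all pieces but the last (default 0).
import Mathlib
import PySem

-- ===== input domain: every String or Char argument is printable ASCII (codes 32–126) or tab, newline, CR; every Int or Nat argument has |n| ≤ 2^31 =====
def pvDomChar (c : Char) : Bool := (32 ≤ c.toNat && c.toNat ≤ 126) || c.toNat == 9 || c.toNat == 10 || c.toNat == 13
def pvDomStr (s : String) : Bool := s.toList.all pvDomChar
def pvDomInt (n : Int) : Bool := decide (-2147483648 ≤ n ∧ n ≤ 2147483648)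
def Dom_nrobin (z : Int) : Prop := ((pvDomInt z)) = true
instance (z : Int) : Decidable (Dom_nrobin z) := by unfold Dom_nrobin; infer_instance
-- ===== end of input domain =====

-- B replaces A's stateful counter/maximum loop with split-on-'1' plus a maximum of the lengths
-- of all pieces except the last (objective: simpler). Same asymptotic cost.

-- ===== PORT A =====
-- decabin: bin(num).replace('ob','') (the replace is ported literally, as in the source)
def decabin (num : Int) : String :=
  PySem.Str.replace (PySem.Int.pyBin num) "ob" ""

-- the for-loop over range(len(numb)) with state (nb, gpm), indexing numb[i] in order
def nrobinLoop : List Char → Int → Int → Int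
  | [], _, gpm => gpm
  | c :: t, nb, gpm =>
    if c = '1' then nrobinLoop t 0 (if nb > gpm then nb else gpm)
    else nrobinLoop t (nb + 1) gpm

def nrobin (z : Int) : Int := nrobinLoop (decabin z).toList 0 0

-- ===== PORT B =====
-- s = bin(z); parts = s.split('1'); max(len(p) for p in parts[:-1]) with default 0
def nrobin_alt (z : Int) : Int :=
  let s := (PySem.Int.pyBin z).toList
  let parts := PySem.Chars.splitOn s ['1']
  (parts.dropLast.map (fun p => (p.length : Int))).foldl (fun g x => max g x) 0

-- ===== PRECONDITION & SPEC =====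
def Spec_nrobin (z : Int) (out : Int) : Prop := out = nrobin_alt z
instance (z : Int) (out : Int) : Decidable (Spec_nrobin z out) := by unfold Spec_nrobin; infer_instance

-- ===== CLAIM (what is proved, stated in full; the proofs are below) =====
def Claim_equal_nrobin : Prop := ∀ (z : Int), Dom_nrobin z → Spec_nrobin z (nrobin z)

-- ===== LEMMAS AND PROOFS =====

-- reference split on '1' (proof-only helper)
def split1 : List Char → List (List Char)
  | [] => [[]]
  | c :: t => if c = '1' then [] :: split1 t else (split1 t).modifyHead (c :: ·)

theorem split1_ne_nil (s : List Char) : split1 s ≠ [] := by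
  induction s with
  | nil => simp [split1]
  | cons c t ih =>
    simp only [split1]
    split
    · simp
    · cases h : split1 t with
      | nil => exact absurd h ih
      | cons p ps => simp [List.modifyHead]

theorem modifyHead_modifyHead {α : Type} (f g : α → α) (l : List α) :
    (l.modifyHead g).modifyHead f = l.modifyHead (fun x => f (g x)) := by
  cases l <;> simp [List.modifyHead]

theorem map_modifyHead {α β : Type} (f : α → β) (g : α → α) (h : β → β)
    (hfg : ∀ x, f (g x) = h (f x)) (l : List α) :
    (l.modifyHead g).map f = (l.map f).modifyHead h := by
  cases l <;> simp [List.modifyHead, hfg]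

theorem dropLast_modifyHead {α : Type} (f : α → α) (l : List α) :
    (l.modifyHead f).dropLast = l.dropLast.modifyHead f := by
  match l with
  | [] => simp [List.modifyHead]
  | [x] => simp [List.modifyHead]
  | x :: y :: t => simp [List.modifyHead, List.dropLast_cons₂]

theorem modifyHead_add_zero (l : List Int) : l.modifyHead (fun x => x + 0) = l := by
  cases l <;> simp [List.modifyHead]

-- PySem.Chars.splitOn with separator ['1'] computes split1
theorem splitOn_go1 (fuel : Nat) :
    ∀ (l : List Char) (cur : List Char) (acc : List (List Char)), l.length < fuel →
      PySem.Chars.splitOn.go ['1'] fuel l cur acc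
        = acc.reverse ++ (split1 l).modifyHead (cur.reverse ++ ·) := by
  induction fuel with
  | zero => intro l cur acc h; omega
  | succ fuel ih =>
    intro l cur acc h
    cases l with
    | nil => simp [PySem.Chars.splitOn.go, split1, List.modifyHead]
    | cons c t =>
      by_cases hc : c = '1'
      · subst hc
        have hpre : List.isPrefixOf ['1'] ('1' :: t) = true := by
          simp [List.isPrefixOf]
        rw [PySem.Chars.splitOn.go]
        simp only [hpre, if_pos, List.length_cons, List.length_nil, List.drop_succ_cons, List.drop_zero]
        rw [ih t [] ((cur.reverse) :: acc) (by simpa using Nat.lt_of_succ_lt_succ h)]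
        have hne := split1_ne_nil t
        cases hs : split1 t with
        | nil => exact absurd hs hne
        | cons p ps =>
          simp [split1, hs, List.modifyHead]
      · have hpre : List.isPrefixOf ['1'] (c :: t) = false := by
          simp [List.isPrefixOf]
          intro hcc
          exact absurd hcc.symm hc
        rw [PySem.Chars.splitOn.go]
        simp only [hpre, Bool.false_eq_true, if_false]
        rw [ih t (c :: cur) acc (by simpa using Nat.lt_of_succ_lt_succ h)]
        simp only [split1, hc, if_false]
        rw [modifyHead_modifyHead]
        simp [List.reverse_cons]


theorem splitOn_eq_split1 (s : List Char) :
    PySem.Chars.splitOn s ['1'] = split1 s := by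
  unfold PySem.Chars.splitOn
  rw [splitOn_go1 (s.length + 1) s [] [] (by omega)]
  cases h : split1 s with
  | nil => exact absurd h (split1_ne_nil s)
  | cons p ps => simp [List.modifyHead]

-- the replace in decabin is a no-op: 'o' never occurs in bin(z)
theorem replace_go_id (fuel : Nat) :
    ∀ (l acc : List Char), 'o' ∉ l →
      PySem.Chars.replace.go ['o', 'b'] [] fuel l acc = acc.reverse ++ l := by
  induction fuel with
  | zero => intro l acc _; rw [PySem.Chars.replace.go]
  | succ fuel ih =>
    intro l acc ho
    cases l with
    | nil => rw [PySem.Chars.replace.go] <;> simp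
    | cons c t =>
      have hc : c ≠ 'o' := fun h => ho (h ▸ List.mem_cons_self)
      have hpre : List.isPrefixOf ['o', 'b'] (c :: t) = false := by
        simp [List.isPrefixOf]
        intro hcc
        exact absurd hcc.symm hc
      rw [PySem.Chars.replace.go]
      simp only [hpre, Bool.false_eq_true, if_false]
      rw [ih t (c :: acc) (fun h => ho (List.mem_cons_of_mem _ h))]
      simp

theorem mem_toDigitsCore (fuel : Nat) :
    ∀ (n : Nat) (acc : List Char) (c : Char), c ∈ Nat.toDigitsCore 2 fuel n acc →
      c ∈ acc ∨ c = '0' ∨ c = '1' := by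
  induction fuel with
  | zero => intro n acc c h; rw [Nat.toDigitsCore] at h; exact Or.inl h
  | succ fuel ih =>
    intro n acc c h
    rw [Nat.toDigitsCore] at h
    have hd : (n % 2).digitChar = '0' ∨ (n % 2).digitChar = '1' := by
      rcases Nat.mod_two_eq_zero_or_one n with h2 | h2 <;> simp [h2, Nat.digitChar]
    by_cases hz : n / 2 = 0
    · simp only [hz, if_pos] at h
      rcases List.mem_cons.mp h with h | h
      · exact Or.inr (h ▸ hd)
      · exact Or.inl h
    · simp only [hz, if_false] at h
      rcases ih (n / 2) ((n % 2).digitChar :: acc) c h with h | h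
      · rcases List.mem_cons.mp h with h | h
        · exact Or.inr (h ▸ hd)
        · exact Or.inl h
      · exact Or.inr h

theorem no_o_pyBin (z : Int) : 'o' ∉ (PySem.Int.pyBin z).toList := by
  rw [PySem.Int.toList_pyBin]
  unfold PySem.Int.toBinChars0b
  intro h
  split at h <;>
  · simp only [List.mem_cons] at h
    rcases h with h | h
    · exact absurd h (by decide)
    all_goals first
      | (rcases h with h | h
         · exact absurd h (by decide)
         · rcases h with h | h
           · exact absurd h (by decide)
           · rcases mem_toDigitsCore _ _ _ _ (by simpa [Nat.toDigits] using h) with h | h | h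
             · simp at h
             · exact absurd h (by decide)
             · exact absurd h (by decide))
      | (rcases h with h | h
         · exact absurd h (by decide)
         · rcases mem_toDigitsCore _ _ _ _ (by simpa [Nat.toDigits] using h) with h | h | h
           · simp at h
           · exact absurd h (by decide)
           · exact absurd h (by decide))

theorem decabin_toList (z : Int) :
    (decabin z).toList = (PySem.Int.pyBin z).toList := by
  unfold decabin
  rw [PySem.Str.toList_replace]
  have : ("ob".toList) = ['o', 'b'] := rfl
  rw [this]
  have h2 : ("".toList) = ([] : List Char) := rfl
  rw [h2]
  unfold PySem.Chars.replace
  simp only [List.isEmpty_cons, Bool.false_eq_true, if_false]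
  rw [replace_go_id _ _ _ (no_o_pyBin z)]
  simp

-- the main loop invariant: A's loop equals a max-fold over the lengths of split1's pieces
-- (all but the last), with the running count nb added to the first piece
theorem nrobinLoop_eq (s : List Char) :
    ∀ (nb gpm : Int),
      nrobinLoop s nb gpm
        = List.foldl (fun g x => if x > g then x else g) gpm
            ((((split1 s).map (fun p => (p.length : Int))).dropLast).modifyHead (· + nb)) := by
  induction s with
  | nil => intro nb gpm; simp [nrobinLoop, split1, List.modifyHead]
  | cons c t ih =>
    intro nb gpm
    by_cases hc : c = '1'
    · subst hc
      simp only [nrobinLoop, if_pos, split1]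
      have hne : (split1 t).map (fun p => (p.length : Int)) ≠ [] := by
        simpa using split1_ne_nil t
      rw [ih 0 (if nb > gpm then nb else gpm)]
      simp only [List.map_cons, List.dropLast_cons_of_ne_nil hne, modifyHead_add_zero]
      cases hs : ((split1 t).map (fun p => (p.length : Int))).dropLast with
      | nil => simp [List.modifyHead, List.foldl]
      | cons q qs => simp [List.modifyHead, List.foldl]
    · simp only [nrobinLoop, hc, if_false, split1]
      rw [ih (nb + 1) gpm]
      rw [map_modifyHead (fun p => (p.length : Int)) (c :: ·) (fun x => x + 1)
        (by intro x; simp)]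
      rw [dropLast_modifyHead, modifyHead_modifyHead]
      have hfun : (fun x : Int => x + 1 + nb) = (fun x : Int => x + (nb + 1)) := by
        funext x; ring
      rw [hfun]

theorem foldl_if_max (l : List Int) :
    ∀ (g : Int),
      List.foldl (fun g x => if x > g then x else g) g l = List.foldl (fun g x => max g x) g l := by
  induction l with
  | nil => intro g; rfl
  | cons x t ih =>
    intro g
    simp only [List.foldl]
    rw [ih]
    congr 1
    by_cases h : x > g
    · rw [if_pos h, max_eq_right h.le]
    · rw [if_neg h, max_eq_left (not_lt.mp h)]

-- ===== VERDICT (by name: the statement is the Claim_ definition above) =====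
theorem nrobin_spec : Claim_equal_nrobin := by
  intro z _
  unfold Spec_nrobin nrobin
  simp only [nrobin_alt]
  rw [decabin_toList, nrobinLoop_eq, modifyHead_add_zero, foldl_if_max]
  simp only [splitOn_eq_split1, List.map_dropLast]
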